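-- pv_equiv track=rewrite | github.com/bloomberg/chromium.bb | third_party/WebKit/Tools/Scripts/webkitpy/w3c/wpt_expectations_updater.py | get_expectations
-- ===== SOURCE A (Python) =====
-- def get_expectations(results, test_name=''):
--
--     """Returns a set of test expectations to use based on results.
--
--     Returns a set of one or more test expectations based on the expected
--     and actual results of a given test name. This function is to decide
--     expectations for tests that could not be rebaselined.
--
--     Args:
--         results: A dictionary that maps one test to its results. Example:
--             {
--                 'test_name': {
--                     'expected': 'PASS',
--                     'actual': 'FAIL',
--                     'bug': 'crbug.com/11111'
--                 }
--             }
--         test_name: The test name string (optional).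
--
--     Returns:
--         A set of one or more test expectation strings with the first letter
--         capitalized. Example: set(['Failure', 'Timeout']).
--     """
--     # If the result is MISSING, this implies that the test was not
--     # rebaselined and has an actual result but no baseline. We can't
--     # add a Missing expectation (this is not allowed), but no other
--     # expectation is correct.
--     # We also want to skip any new manual tests that are not automated;
--     # see crbug.com/708241 for context.
--     if (results['actual'] == 'MISSING' or
--             '-manual.' in test_name and results['actual'] == 'TIMEOUT'):
--         return {'Skip'}
--     expectations = set()
--     failure_types = ('TEXT', 'IMAGE+TEXT', 'IMAGE', 'AUDIO')
--     other_types = ('TIMEOUT', 'CRASH', 'PASS')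
--     for actual in results['actual'].split():
--         if actual in failure_types:
--             expectations.add('Failure')
--         if actual in other_types:
--             expectations.add(actual.capitalize())
--     return expectations
-- ===== SOURCE B (Python) =====
-- _EXPECTATION_TABLE = (
--     ('TEXT', 'Failure'),
--     ('IMAGE+TEXT', 'Failure'),
--     ('IMAGE', 'Failure'),
--     ('AUDIO', 'Failure'),
--     ('TIMEOUT', 'Timeout'),
--     ('CRASH', 'Crash'),
--     ('PASS', 'Pass'),
-- )
--
--
-- def get_expectations(results, test_name=''):
--     if (results['actual'] == 'MISSING' or
--             '-manual.' in test_name and results['actual'] == 'TIMEOUT'):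
--         return {'Skip'}
--     tokens = results['actual'].split()
--     return {exp for tok, exp in _EXPECTATION_TABLE if tok in tokens}
-- ===== Notes on version B (the rewrite author's own statement) =====
-- stated objective: alternative
-- what changed: Table-driven rewrite: instead of looping over the actual tokens and branching on two type tuples with capitalize(), B iterates over a fixed token-to-expectation lookup table and keeps the precomputed expectation of every table entry whose token occurs in the split result.
import Mathlib
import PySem

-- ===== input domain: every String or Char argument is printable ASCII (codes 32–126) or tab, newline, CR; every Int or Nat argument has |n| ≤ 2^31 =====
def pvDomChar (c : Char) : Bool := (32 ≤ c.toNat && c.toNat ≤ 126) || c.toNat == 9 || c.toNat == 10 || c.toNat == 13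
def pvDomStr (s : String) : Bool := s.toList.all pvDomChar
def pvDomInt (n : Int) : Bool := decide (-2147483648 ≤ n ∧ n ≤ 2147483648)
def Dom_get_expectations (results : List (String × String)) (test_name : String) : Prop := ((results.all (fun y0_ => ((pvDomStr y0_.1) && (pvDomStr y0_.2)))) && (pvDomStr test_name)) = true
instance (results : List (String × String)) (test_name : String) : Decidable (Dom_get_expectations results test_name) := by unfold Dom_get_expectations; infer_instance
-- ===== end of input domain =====

-- B is table-driven: it iterates over a fixed token→expectation lookup table instead of over the
-- actual tokens, with the expectations precomputed (no capitalize, no per-token branching) (objective: alternative).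
-- Both Pythons return a set; the ports return its canonical (sorted) representation, since set iteration order is not modelled.

-- ===== PORT A =====
-- str.capitalize, ported by hand; exact on the ASCII domain (Dom) these theorems are about
def pyCapitalize (s : String) : String :=
  match s.toList with
  | [] => ""
  | c :: r => String.ofList (c.toUpper :: r.map Char.toLower)

-- results['actual'] on the association list: first match, none = KeyError
def pyDictGet? (d : List (String × String)) (k : String) : Option String :=
  (d.find? (fun p => p.1 == k)).map Prod.snd

def failureTypes : List String := ["TEXT", "IMAGE+TEXT", "IMAGE", "AUDIO"]
def otherTypes : List String := ["TIMEOUT", "CRASH", "PASS"]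

-- the body of A's loop: the two branch tests on one token
def stepA (exp : PySem.Set String) (a : String) : PySem.Set String :=
  let exp' := if failureTypes.contains a then PySem.Set.add exp "Failure" else exp
  if otherTypes.contains a then PySem.Set.add exp' (pyCapitalize a) else exp'

def get_expectations (results : List (String × String)) (test_name : String) : List String :=
  match pyDictGet? results "actual" with
  | none => []   -- KeyError; excluded by Pre_
  | some actual =>
    if actual == "MISSING" || (PySem.Str.isIn "-manual." test_name && actual == "TIMEOUT") then
      ["Skip"]
    else
      let expectations : PySem.Set String :=
        (PySem.Str.split₀ actual).foldl stepA PySem.Set.empty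
      PySem.List.sorted expectations (fun x => x) false

-- ===== PORT B =====
-- B's fixed lookup table, token → expectation
def expectationTable : List (String × String) :=
  [("TEXT", "Failure"), ("IMAGE+TEXT", "Failure"), ("IMAGE", "Failure"), ("AUDIO", "Failure"),
   ("TIMEOUT", "Timeout"), ("CRASH", "Crash"), ("PASS", "Pass")]

-- the body of B's set comprehension over the table: keep p.2 iff p.1 occurs among the tokens
def stepB (tokens : List String) (s : PySem.Set String) (p : String × String) : PySem.Set String :=
  if tokens.contains p.1 then PySem.Set.add s p.2 else s

def get_expectations_alt (results : List (String × String)) (test_name : String) : List String :=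
  match pyDictGet? results "actual" with
  | none => []   -- KeyError; excluded by Pre_
  | some actual =>
    if actual == "MISSING" || (PySem.Str.isIn "-manual." test_name && actual == "TIMEOUT") then
      ["Skip"]
    else
      let tokens := PySem.Str.split₀ actual
      PySem.List.sorted (expectationTable.foldl (stepB tokens) PySem.Set.empty) (fun x => x) false

-- ===== PRECONDITION & SPEC =====
-- Pre_ excludes exactly the inputs where results has no 'actual' key, on which A raises KeyError.
def Pre_get_expectations (results : List (String × String)) (test_name : String) : Prop :=
  "actual" ∈ results.map Prod.fst
instance (results : List (String × String)) (test_name : String) : Decidable (Pre_get_expectations results test_name) := by unfold Pre_get_expectations; infer_instance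
def pvWitness_get_expectations : (List (String × String)) × String := ([("actual", "PASS TEXT")], "t.html")

def Spec_get_expectations (results : List (String × String)) (test_name : String) (out : List String) : Prop := out = get_expectations_alt results test_name
instance (results : List (String × String)) (test_name : String) (out : List String) : Decidable (Spec_get_expectations results test_name out) := by unfold Spec_get_expectations; infer_instance

-- ===== CLAIM (what is proved, stated in full; the proofs are below) =====
def Claim_equal_get_expectations : Prop := ∀ (results : List (String × String)) (test_name : String), Dom_get_expectations results test_name → Pre_get_expectations results test_name → Spec_get_expectations results test_name (get_expectations results test_name)

-- ===== LEMMAS AND PROOFS =====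

lemma mem_stepA (s : PySem.Set String) (a x : String) :
    x ∈ stepA s a ↔ x ∈ s ∨ (x = "Failure" ∧ a ∈ failureTypes) ∨ (a ∈ otherTypes ∧ x = pyCapitalize a) := by
  unfold stepA
  split_ifs with h1 h2 h2 <;>
    simp_all only [PySem.Set.mem_add, List.contains_eq_mem, decide_eq_true_eq] <;> tauto

lemma nodup_stepA (s : PySem.Set String) (a : String) (hs : s.Nodup) : (stepA s a).Nodup := by
  unfold stepA
  split_ifs <;>
    first
      | exact PySem.Set.nodup_add _ _ (PySem.Set.nodup_add _ _ hs)
      | exact PySem.Set.nodup_add _ _ hs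
      | exact hs

-- membership in A's loop accumulator
lemma mem_loopA (ts : List String) (s : PySem.Set String) (x : String) :
    x ∈ ts.foldl stepA s
    ↔ x ∈ s ∨ (x = "Failure" ∧ ∃ a ∈ ts, a ∈ failureTypes) ∨ (∃ a ∈ ts, a ∈ otherTypes ∧ x = pyCapitalize a) := by
  induction ts generalizing s with
  | nil => simp
  | cons t ts ih =>
    simp only [List.foldl_cons, ih, mem_stepA, List.mem_cons]
    constructor
    · rintro ((h | ⟨hx, hf⟩ | ⟨ho, hx⟩) | ⟨hx, a, ha, haf⟩ | ⟨a, ha, hao, hx⟩)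
      · exact Or.inl h
      · exact Or.inr (Or.inl ⟨hx, t, Or.inl rfl, hf⟩)
      · exact Or.inr (Or.inr ⟨t, Or.inl rfl, ho, hx⟩)
      · exact Or.inr (Or.inl ⟨hx, a, Or.inr ha, haf⟩)
      · exact Or.inr (Or.inr ⟨a, Or.inr ha, hao, hx⟩)
    · rintro (h | ⟨hx, a, (rfl | ha), haf⟩ | ⟨a, (rfl | ha), hao, hx⟩)
      · exact Or.inl (Or.inl h)
      · exact Or.inl (Or.inr (Or.inl ⟨hx, haf⟩))
      · exact Or.inr (Or.inl ⟨hx, a, ha, haf⟩)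
      · exact Or.inl (Or.inr (Or.inr ⟨hao, hx⟩))
      · exact Or.inr (Or.inr ⟨a, ha, hao, hx⟩)

lemma nodup_loopA (ts : List String) (s : PySem.Set String) (hs : s.Nodup) :
    (ts.foldl stepA s).Nodup := by
  induction ts generalizing s with
  | nil => exact hs
  | cons t ts ih => exact ih _ (nodup_stepA _ _ hs)

-- membership in B's table fold (over any table suffix)
lemma mem_loopB (tbl : List (String × String)) (ts : List String) (s : PySem.Set String) (x : String) :
    x ∈ tbl.foldl (stepB ts) s ↔ x ∈ s ∨ ∃ p ∈ tbl, p.1 ∈ ts ∧ x = p.2 := by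
  induction tbl generalizing s with
  | nil => simp
  | cons q tbl ih =>
    simp only [List.foldl_cons, ih, List.mem_cons]
    have hq : x ∈ stepB ts s q ↔ x ∈ s ∨ (q.1 ∈ ts ∧ x = q.2) := by
      unfold stepB
      split_ifs with h <;>
        simp_all only [PySem.Set.mem_add, List.contains_eq_mem, decide_eq_true_eq] <;> tauto
    rw [hq]
    constructor
    · rintro ((h | hq') | ⟨p, hp, h1, h2⟩)
      · exact Or.inl h
      · exact Or.inr ⟨q, Or.inl rfl, hq'⟩
      · exact Or.inr ⟨p, Or.inr hp, h1, h2⟩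
    · rintro (h | ⟨p, (rfl | hp), h1, h2⟩)
      · exact Or.inl (Or.inl h)
      · exact Or.inl (Or.inr ⟨h1, h2⟩)
      · exact Or.inr ⟨p, hp, h1, h2⟩

lemma nodup_loopB (tbl : List (String × String)) (ts : List String) (s : PySem.Set String)
    (hs : s.Nodup) : (tbl.foldl (stepB ts) s).Nodup := by
  induction tbl generalizing s with
  | nil => exact hs
  | cons q tbl ih =>
    refine ih _ ?_
    unfold stepB
    split_ifs
    · exact PySem.Set.nodup_add _ _ hs
    · exact hs

-- the two membership characterizations agree (bridge between A's branch tests and B's table)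
lemma table_char (ts : List String) (x : String) :
    ((x = "Failure" ∧ ∃ a ∈ ts, a ∈ failureTypes) ∨ (∃ a ∈ ts, a ∈ otherTypes ∧ x = pyCapitalize a))
    ↔ ∃ p ∈ expectationTable, p.1 ∈ ts ∧ x = p.2 := by
  constructor
  · rintro (⟨rfl, a, ha, haf⟩ | ⟨a, ha, hao, hx⟩)
    · rcases (by simpa [failureTypes] using haf : a = "TEXT" ∨ a = "IMAGE+TEXT" ∨ a = "IMAGE" ∨ a = "AUDIO") with rfl | rfl | rfl | rfl
      · exact ⟨("TEXT", "Failure"), by simp [expectationTable], ha, rfl⟩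
      · exact ⟨("IMAGE+TEXT", "Failure"), by simp [expectationTable], ha, rfl⟩
      · exact ⟨("IMAGE", "Failure"), by simp [expectationTable], ha, rfl⟩
      · exact ⟨("AUDIO", "Failure"), by simp [expectationTable], ha, rfl⟩
    · rcases (by simpa [otherTypes] using hao : a = "TIMEOUT" ∨ a = "CRASH" ∨ a = "PASS") with rfl | rfl | rfl
      · exact ⟨("TIMEOUT", "Timeout"), by simp [expectationTable], ha, by rw [hx]; decide⟩
      · exact ⟨("CRASH", "Crash"), by simp [expectationTable], ha, by rw [hx]; decide⟩
      · exact ⟨("PASS", "Pass"), by simp [expectationTable], ha, by rw [hx]; decide⟩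
  · rintro ⟨p, hp, h1, rfl⟩
    rcases (by simpa [expectationTable] using hp :
        p = ("TEXT", "Failure") ∨ p = ("IMAGE+TEXT", "Failure") ∨ p = ("IMAGE", "Failure") ∨
        p = ("AUDIO", "Failure") ∨ p = ("TIMEOUT", "Timeout") ∨ p = ("CRASH", "Crash") ∨
        p = ("PASS", "Pass")) with rfl | rfl | rfl | rfl | rfl | rfl | rfl
    · exact Or.inl ⟨rfl, _, h1, by simp [failureTypes]⟩
    · exact Or.inl ⟨rfl, _, h1, by simp [failureTypes]⟩
    · exact Or.inl ⟨rfl, _, h1, by simp [failureTypes]⟩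
    · exact Or.inl ⟨rfl, _, h1, by simp [failureTypes]⟩
    · exact Or.inr ⟨_, h1, by simp [otherTypes], by decide⟩
    · exact Or.inr ⟨_, h1, by simp [otherTypes], by decide⟩
    · exact Or.inr ⟨_, h1, by simp [otherTypes], by decide⟩

-- ===== VERDICT (by name: the statement is the Claim_ definition above) =====
theorem get_expectations_spec : Claim_equal_get_expectations := by
  intro results test_name _ hpre
  unfold Spec_get_expectations get_expectations get_expectations_alt
  have hsome : (pyDictGet? results "actual").isSome := by
    unfold pyDictGet?
    rw [Option.isSome_map, List.find?_isSome]
    unfold Pre_get_expectations at hpre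
    obtain ⟨p, hp, hp2⟩ := List.mem_map.mp hpre
    exact ⟨p, hp, by simp [hp2]⟩
  obtain ⟨actual, heq⟩ := Option.isSome_iff_exists.mp hsome
  rw [heq]
  dsimp only
  by_cases hguard : (actual == "MISSING" || (PySem.Str.isIn "-manual." test_name && actual == "TIMEOUT")) = true
  · rw [if_pos hguard, if_pos hguard]
  · rw [if_neg hguard, if_neg hguard]
    refine (PySem.List.sorted_id_eq_sorted_id_iff_perm (κ := String) _ _).mpr ?_
    refine (List.perm_ext_iff_of_nodup (nodup_loopA _ _ List.nodup_nil)
      (nodup_loopB _ _ _ List.nodup_nil)).mpr (fun x => ?_)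
    rw [mem_loopA, mem_loopB]
    have := table_char (PySem.Str.split₀ actual) x
    constructor
    · rintro (h | h)
      · simp at h
      · exact Or.inr (this.mp h)
    · rintro (h | h)
      · simp at h
      · exact Or.inr (this.mpr h)
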